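-- pv_equiv track=rewrite | github.com/maybeJLorenz/Network-Systems-Projects | lab6/pox-controller.py | is_same_subnet
-- ===== SOURCE A (Python) =====
-- def is_same_subnet(ip1, ip2):
--     # Define subnet masks
--     subnets = {
--         '10.100.100.': 'university',
--         '10.40.3.': 'it',
--         '10.0.1.': 'faculty',
--         '10.0.2.': 'student'
--     }
--
--     for subnet_prefix in subnets:
--         if ip1.startswith(subnet_prefix) and ip2.startswith(subnet_prefix):
--             return True
--     return False
-- ===== SOURCE B (Python) =====
-- SUBNET_PREFIXES = ('10.100.100.', '10.40.3.', '10.0.1.', '10.0.2.')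
--
-- def is_same_subnet(ip1, ip2):
--     # Longest common prefix of the two addresses, built character by character.
--     chars = []
--     for a, b in zip(ip1, ip2):
--         if a != b:
--             break
--         chars.append(a)
--     common = ''.join(chars)
--     # They share a subnet iff some known prefix is a prefix of their common part.
--     return any(common.startswith(p) for p in SUBNET_PREFIXES)
-- ===== Notes on version B (the rewrite author's own statement) =====
-- stated objective: alternative
-- what changed: B first computes the longest common character prefix of the two addresses in one zip pass and then asks whether any known subnet prefix is a prefix of that common string, instead of A's scan testing both IPs against each prefix in turn; correct because both IPs start with p exactly when p is a prefix of their longest common prefix.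
import Mathlib
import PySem

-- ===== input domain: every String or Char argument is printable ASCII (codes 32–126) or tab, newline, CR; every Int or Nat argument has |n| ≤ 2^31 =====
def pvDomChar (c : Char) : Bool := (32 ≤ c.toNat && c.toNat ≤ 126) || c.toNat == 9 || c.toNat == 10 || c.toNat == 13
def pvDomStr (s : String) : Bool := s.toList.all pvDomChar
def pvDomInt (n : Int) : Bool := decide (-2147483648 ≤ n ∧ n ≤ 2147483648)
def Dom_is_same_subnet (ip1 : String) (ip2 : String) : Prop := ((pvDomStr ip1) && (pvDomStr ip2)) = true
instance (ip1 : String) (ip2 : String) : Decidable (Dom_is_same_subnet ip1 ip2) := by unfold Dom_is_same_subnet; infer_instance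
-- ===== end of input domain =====

-- B replaces A's paired per-prefix scan by first computing the longest common prefix of the
-- two addresses and then checking whether any known subnet prefix is a prefix of it.

-- ===== PORT A =====
-- the dict literal from A; iteration is over its keys in insertion order
def pvSubnetsA : List (String × String) :=
  [("10.100.100.", "university"), ("10.40.3.", "it"), ("10.0.1.", "faculty"), ("10.0.2.", "student")]

-- the for-loop of A: first prefix both IPs start with → True, else fall through to False
def pvLoopA (ip1 : String) (ip2 : String) : List String → Bool
  | [] => false
  | p :: ps =>
    if PySem.Str.startswith ip1 p && PySem.Str.startswith ip2 p then true
    else pvLoopA ip1 ip2 ps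

def is_same_subnet (ip1 : String) (ip2 : String) : Bool :=
  pvLoopA ip1 ip2 (pvSubnetsA.map Prod.fst)

-- ===== PORT B =====
def pvPrefixesB : List String := ["10.100.100.", "10.40.3.", "10.0.1.", "10.0.2."]

-- the zip loop of Source B: longest common prefix, built character by character
def pvCommonChars : List Char → List Char → List Char
  | a :: as, b :: bs => if a = b then a :: pvCommonChars as bs else []
  | _, _ => []

def is_same_subnet_alt (ip1 : String) (ip2 : String) : Bool :=
  let common := String.ofList (pvCommonChars ip1.toList ip2.toList)
  pvPrefixesB.any (fun p => PySem.Str.startswith common p)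

-- ===== PRECONDITION & SPEC =====
def Spec_is_same_subnet (ip1 : String) (ip2 : String) (out : Bool) : Prop := out = is_same_subnet_alt ip1 ip2
instance (ip1 : String) (ip2 : String) (out : Bool) : Decidable (Spec_is_same_subnet ip1 ip2 out) := by unfold Spec_is_same_subnet; infer_instance

-- ===== CLAIM =====
def Claim_equal_is_same_subnet : Prop := ∀ (ip1 : String) (ip2 : String), Dom_is_same_subnet ip1 ip2 → Spec_is_same_subnet ip1 ip2 (is_same_subnet ip1 ip2)

-- ===== LEMMAS AND PROOFS =====

-- a list is a prefix of the longest common prefix iff it is a prefix of both lists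
theorem pvPrefixCommon (p l1 l2 : List Char) :
    p <+: pvCommonChars l1 l2 ↔ p <+: l1 ∧ p <+: l2 := by
  induction l1 generalizing l2 p with
  | nil =>
    have h0 : pvCommonChars [] l2 = [] := rfl
    rw [h0]
    constructor
    · intro h; rw [List.prefix_nil] at h; subst h; simp
    · rintro ⟨h, _⟩; rw [List.prefix_nil] at h; subst h; exact List.nil_prefix
  | cons a as ih =>
    cases l2 with
    | nil =>
      have h0 : pvCommonChars (a :: as) [] = [] := rfl
      rw [h0]
      constructor
      · intro h; rw [List.prefix_nil] at h; subst h; simp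
      · rintro ⟨_, h⟩; rw [List.prefix_nil] at h; subst h; exact List.nil_prefix
    | cons b bs =>
      by_cases hab : a = b
      · subst hab
        cases p with
        | nil => simp [pvCommonChars]
        | cons c cs => simp [pvCommonChars, List.cons_prefix_cons, ih]; tauto
      · simp only [pvCommonChars, if_neg hab, List.prefix_nil]
        constructor
        · rintro rfl; simp
        · rintro ⟨h1, h2⟩
          cases p with
          | nil => rfl
          | cons c cs =>
            rw [List.cons_prefix_cons] at h1 h2
            exact absurd (h1.1 ▸ h2.1) hab

-- per prefix: starting with the common prefix = both IPs starting with it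
theorem pvStartsCommon (ip1 ip2 p : String) :
    PySem.Str.startswith (String.ofList (pvCommonChars ip1.toList ip2.toList)) p
      = (PySem.Str.startswith ip1 p && PySem.Str.startswith ip2 p) := by
  rw [Bool.eq_iff_iff]
  simp only [PySem.Str.startswith_eq, PySem.Chars.startswith_iff, Bool.and_eq_true,
    String.toList_ofList]
  exact pvPrefixCommon p.toList ip1.toList ip2.toList

theorem pv_main (ip1 ip2 : String) : is_same_subnet ip1 ip2 = is_same_subnet_alt ip1 ip2 := by
  simp only [is_same_subnet, is_same_subnet_alt, pvSubnetsA, pvPrefixesB, List.map, List.any,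
    pvLoopA, pvStartsCommon]
  by_cases h1 : (PySem.Str.startswith ip1 "10.100.100." && PySem.Str.startswith ip2 "10.100.100.") = true <;>
  by_cases h2 : (PySem.Str.startswith ip1 "10.40.3." && PySem.Str.startswith ip2 "10.40.3.") = true <;>
  by_cases h3 : (PySem.Str.startswith ip1 "10.0.1." && PySem.Str.startswith ip2 "10.0.1.") = true <;>
  by_cases h4 : (PySem.Str.startswith ip1 "10.0.2." && PySem.Str.startswith ip2 "10.0.2.") = true <;>
  simp_all

-- ===== VERDICT =====
theorem is_same_subnet_spec : Claim_equal_is_same_subnet := by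
  intro ip1 ip2 _
  unfold Spec_is_same_subnet
  exact pv_main ip1 ip2
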